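-- pv_equiv track=rewrite | github.com/qldrh112/qldrh112 | ssafy/algorithm/20240130/4831.py | min_charge_num
-- ===== SOURCE A (Python) =====
-- def min_charge_num (K, N, M, lst):
--     """
--     :param K: 한 번 충전으로 이동할 수 있는 거리
--     :param N: 종점까지의 거리
--     :param M: 충전기가 설치된 수
--     :param lst: 충전기가 설치된 곳의 위치 리스트
--     :return: 종점으로 가는 최소 충전 수
--     """
--     for i in range(M-1):                      # (0, 9)
--         if lst[i+1] - lst[i] > K:           # 다음 정류소까지 가는 것이 충전량보다 크면
--             return 0                        # 0을 반환하는 것 모두 쳐내기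
--         elif N - lst[-1] > K:
--             return 0
--         elif lst[0] - 0 > K:
--             return 0
--
--     position = 0                               # 현위치
--     count = 0                           # 이동 횟수
--     while N-K > position:                      # 현위치가 종착지까지 충전 안 해도 될 때까지 반복합니다.
--         for j in range(K+position, 0+position, -1):   # 현 위치에서 K칸까지 탐색하여 충전소가 그 안에 있으면 현 위치를 이동합니다.
--             if j in lst:
--                 position = j
--                 count += 1
--                 break
--
--     return count
-- ===== SOURCE B (Python) =====
-- def min_charge_num(K, N, M, lst):
--     # Feasibility pre-check over the M declared chargers (A runs it only when M >= 2).
--     if M >= 2: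
--         if any(b - a > K for a, b in zip(lst, lst[1:M])):
--             return 0
--         if lst[0] > K or N - lst[-1] > K:
--             return 0
--     # Greedy: sort once, advance a monotone pointer to the farthest reachable station.
--     s = sorted(lst)
--     pos = 0
--     i = 0
--     count = 0
--     while N - K > pos:
--         while i + 1 < len(s) and s[i + 1] <= pos + K:
--             i += 1
--         pos = s[i]
--         count += 1
--     return count
-- ===== Notes on version B (the rewrite author's own statement) =====
-- stated objective: alternative
-- what changed: B replaces A's per-hop brute scan (trying every integer j in (pos, pos+K] against a list membership test) by sorting the stations once and advancing a single monotone index pointer over the sorted list to the farthest reachable station; Pre_ excludes only inputs where A raises IndexError or loops forever.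
import Mathlib
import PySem

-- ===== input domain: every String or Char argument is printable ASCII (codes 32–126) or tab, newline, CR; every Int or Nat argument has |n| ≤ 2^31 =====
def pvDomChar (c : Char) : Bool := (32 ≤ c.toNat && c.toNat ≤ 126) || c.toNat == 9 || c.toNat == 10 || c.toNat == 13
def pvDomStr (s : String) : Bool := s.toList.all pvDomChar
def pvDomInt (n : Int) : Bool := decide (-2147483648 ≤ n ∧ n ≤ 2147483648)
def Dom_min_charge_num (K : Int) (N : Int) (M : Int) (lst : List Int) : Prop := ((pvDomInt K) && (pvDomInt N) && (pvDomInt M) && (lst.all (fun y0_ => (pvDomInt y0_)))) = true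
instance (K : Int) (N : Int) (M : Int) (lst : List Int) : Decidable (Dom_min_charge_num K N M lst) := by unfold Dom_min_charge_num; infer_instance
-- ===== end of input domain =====

-- B replaces A's per-hop integer scan `for j in range(K+pos, pos, -1): if j in lst` by sorting the
-- stations once and advancing a single monotone pointer over the sorted list: a different algorithm
-- for picking the farthest reachable station. Equivalence is about the return value on Pre_.

-- ===== PORT A =====
-- inner loop: `for j in range(K+position, 0+position, -1): if j in lst: ...` — first j (scanning down) contained in lst
def pvScanA (lst : List Int) (j stop : Int) : Option Int :=
  if h : stop < j then
    if lst.contains j then some j else pvScanA lst (j - 1) stop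
  else none
termination_by (j - stop).toNat
decreasing_by simp_wf; omega

-- first loop: `for i in range(M-1): if ... return 0 elif ... return 0 elif ... return 0` (some 0 = early
-- return); ported as recursion on the loop index i, since Python's range is lazy. Inside Pre_ every index
-- A reads is in range, so pyGetD's default is never taken (out-of-range reads are A's IndexError, outside Pre_).
def pvCheckA (K N M : Int) (lst : List Int) (i : Int) : Option Int :=
  if h : i < M - 1 then
    if (PySem.List.pyGetD lst (i + 1) 0) - (PySem.List.pyGetD lst i 0) > K then some 0
    else if N - (PySem.List.pyGetD lst (-1) 0) > K then some 0
    else if (PySem.List.pyGetD lst 0 0) > K then some 0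
    else pvCheckA K N M lst (i + 1)
  else none
termination_by (M - 1 - i).toNat
decreasing_by simp_wf; omega

-- `while N-K > position:` — fuel models Python's loop (inside Pre_ the loop terminates within the fuel;
-- when the inner scan finds nothing Python spins forever on the same state, mirrored by the no-change recursion)
def pvLoopA (K N : Int) (lst : List Int) (pos count : Int) : Nat → Int
  | 0 => count
  | fuel + 1 =>
    if N - K > pos then
      match pvScanA lst (K + pos) pos with
      | some j => pvLoopA K N lst j (count + 1) fuel
      | none => pvLoopA K N lst pos count fuel
    else count

def min_charge_num (K : Int) (N : Int) (M : Int) (lst : List Int) : Int :=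
  match pvCheckA K N M lst 0 with
  | some r => r
  | none => pvLoopA K N lst 0 0 ((N - K).toNat + 1)

-- ===== PORT B =====
-- `while i + 1 < len(s) and s[i+1] <= pos + K: i += 1`
def pvAdvB (s : List Int) (pK : Int) (i : Nat) : Nat :=
  if i + 1 < s.length then
    if s.getD (i + 1) 0 ≤ pK then pvAdvB s pK (i + 1) else i
  else i
termination_by s.length - i

-- `while N - K > pos:` of Source B (fuel as in A's port; s[i] is in range whenever B's Python runs)
def pvLoopB (K N : Int) (s : List Int) (pos : Int) (i : Nat) (count : Int) : Nat → Int
  | 0 => count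
  | fuel + 1 =>
    if N - K > pos then
      let i' := pvAdvB s (pos + K) i
      pvLoopB K N s (s.getD i' 0) i' (count + 1) fuel
    else count

def min_charge_num_alt (K : Int) (N : Int) (M : Int) (lst : List Int) : Int :=
  if 2 ≤ M then
    if (lst.zip (PySem.List.slice lst (some 1) (some M))).any (fun p => decide (p.2 - p.1 > K)) then 0
    else if (PySem.List.pyGetD lst 0 0 > K) ∨ (N - PySem.List.pyGetD lst (-1) 0 > K) then 0
    else pvLoopB K N (PySem.List.sorted lst (fun x => x) false) 0 0 0 ((N - K).toNat + 1)
  else pvLoopB K N (PySem.List.sorted lst (fun x => x) false) 0 0 0 ((N - K).toNat + 1)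

-- ===== PRECONDITION & SPEC =====
-- Pre_ admits EXACTLY the inputs on which A returns: either A's feasibility pre-check fires (first
-- disjunct: the check reads only in-range indices up to the firing one and returns 0), or the check
-- passes without an out-of-range read (M ≤ 1 skips it; otherwise M ≤ len(lst) with no firing condition)
-- AND the greedy loop terminates (second conjunct: no reachable position below N-K has an empty
-- charger window). It excludes only inputs where A raises IndexError (the check reads past the end of
-- lst before any condition fires) or loops forever (some reachable position < N-K with no charger in
-- (p, p+K], where A's scan finds nothing and the while loop spins on unchanged state).
def Pre_min_charge_num (K : Int) (N : Int) (M : Int) (lst : List Int) : Prop :=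
  (2 ≤ M ∧ 2 ≤ lst.length ∧
    ((((lst.zip lst.tail).take (M - 1).toNat).any (fun p => decide (p.2 - p.1 > K))) = true ∨
      lst.getD 0 0 > K ∨ N - lst.getLast?.getD 0 > K)) ∨
  ((M ≤ 1 ∨
    (2 ≤ M ∧ M ≤ lst.length ∧
      (((lst.zip lst.tail).take (M - 1).toNat).all (fun p => decide (p.2 - p.1 ≤ K))) = true ∧
      lst.getD 0 0 ≤ K ∧ N - lst.getLast?.getD 0 ≤ K)) ∧
   (N - K ≤ 0 ∨ ∀ p ∈ (0 :: lst), 0 ≤ p → p < N - K → ∃ x ∈ lst, p < x ∧ x ≤ p + K))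
instance (K : Int) (N : Int) (M : Int) (lst : List Int) : Decidable (Pre_min_charge_num K N M lst) := by unfold Pre_min_charge_num; infer_instance

def pvWitness_min_charge_num : Int × Int × Int × List Int := (5, 10, 2, [3, 7])

def Spec_min_charge_num (K : Int) (N : Int) (M : Int) (lst : List Int) (out : Int) : Prop := out = min_charge_num_alt K N M lst
instance (K : Int) (N : Int) (M : Int) (lst : List Int) (out : Int) : Decidable (Spec_min_charge_num K N M lst out) := by unfold Spec_min_charge_num; infer_instance

-- ===== CLAIM (what is proved, stated in full; the proofs are below) =====
def Claim_equal_min_charge_num : Prop := ∀ (K : Int) (N : Int) (M : Int) (lst : List Int), Dom_min_charge_num K N M lst → Pre_min_charge_num K N M lst → Spec_min_charge_num K N M lst (min_charge_num K N M lst)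

-- ===== LEMMAS AND PROOFS =====

-- A's descending scan returns m when m is the largest integer in (stop, start] contained in lst
theorem pvScanA_eq_some (lst : List Int) (stop m : Int)
    (h1 : stop < m) (h3 : lst.contains m) :
    ∀ (n : Nat) (start : Int), (start - m).toNat = n → m ≤ start →
      (∀ t, m < t → t ≤ start → ¬ lst.contains t) →
      pvScanA lst start stop = some m := by
  intro n
  induction n with
  | zero =>
    intro start hn hms hmax
    have heq : start = m := by omega
    subst heq
    rw [pvScanA, dif_pos h1, if_pos h3]
  | succ k ih =>
    intro start hn hms hmax
    have hlt : m < start := by omega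
    have hns : lst.contains start = false := by
      have := hmax start hlt le_rfl
      simpa using this
    rw [pvScanA]
    have hss : stop < start := by omega
    rw [dif_pos hss, hns]
    simp only [Bool.false_eq_true, if_false]
    exact ih (start - 1) (by omega) (by omega) (fun t ht1 ht2 => hmax t ht1 (by omega))

-- B's pointer advance: stays in range, lands on a value ≤ pK, and the next value (if any) exceeds pK
theorem pvAdvB_spec (s : List Int) (pK : Int) :
    ∀ (n i : Nat), s.length - i = n → i < s.length → s.getD i 0 ≤ pK →
      i ≤ pvAdvB s pK i ∧ pvAdvB s pK i < s.length ∧ s.getD (pvAdvB s pK i) 0 ≤ pK ∧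
      (pvAdvB s pK i + 1 < s.length → pK < s.getD (pvAdvB s pK i + 1) 0) := by
  intro n
  induction n with
  | zero => intro i hn hi _; omega
  | succ k ih =>
    intro i hn hi h0
    rw [pvAdvB]
    by_cases h1 : i + 1 < s.length
    · by_cases h2 : s.getD (i + 1) 0 ≤ pK
      · rw [if_pos h1, if_pos h2]
        obtain ⟨a1, a2, a3, a4⟩ := ih (i + 1) (by omega) h1 h2
        exact ⟨by omega, a2, a3, a4⟩
      · rw [if_pos h1, if_neg h2]
        exact ⟨le_rfl, hi, h0, fun _ => lt_of_not_ge h2⟩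
    · rw [if_neg h1]
      exact ⟨le_rfl, hi, h0, fun h => absurd h h1⟩

-- the two loops agree step by step: A's scan picks exactly the station B's pointer lands on
theorem pvLoop_eq (K N : Int) (lst : List Int)
    (HW : ∀ p, (p = 0 ∨ p ∈ lst) → 0 ≤ p → p < N - K → ∃ x ∈ lst, p < x ∧ x ≤ p + K) :
    ∀ (fuel : Nat) (pos count : Int) (i : Nat),
      0 ≤ pos → (pos = 0 ∨ pos ∈ lst) →
      i < (PySem.List.sorted lst (fun x => x) false).length →
      (PySem.List.sorted lst (fun x => x) false).getD i 0 ≤ pos + K →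
      pvLoopA K N lst pos count fuel =
        pvLoopB K N (PySem.List.sorted lst (fun x => x) false) pos i count fuel := by
  intro fuel
  induction fuel with
  | zero => intro pos count i _ _ _ _; rfl
  | succ f ih =>
    intro pos count i h0 hmem hi hiK
    rw [pvLoopA, pvLoopB]
    by_cases hc : N - K > pos
    · rw [if_pos hc, if_pos hc]
      set s := PySem.List.sorted lst (fun x => x) false with hs
      obtain ⟨x, hxmem, hxgt, hxle⟩ := HW pos hmem h0 (by omega)
      -- B's pointer lands on i' with the stated properties
      obtain ⟨hii', hi'len, hi'le, hi'next⟩ :=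
        pvAdvB_spec s (pos + K) (s.length - i) i rfl hi hiK
      set i' := pvAdvB s (pos + K) i with hi'
      set m := s.getD i' 0 with hm
      have hmget : m = s[i'] := List.getD_eq_getElem s 0 hi'len
      -- maximality of m among chargers ≤ pos + K
      have hmax : ∀ y ∈ s, y ≤ pos + K → y ≤ m := by
        intro y hy hyle
        obtain ⟨j, hj, rfl⟩ := List.mem_iff_getElem.mp hy
        by_cases hji : j ≤ i'
        · rw [hmget]; exact PySem.List.sorted_id_getElem_mono lst hji hi'len
        · exfalso
          have hj1 : i' + 1 < s.length := by omega
          have : s[i' + 1] ≤ s[j] :=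
            PySem.List.sorted_id_getElem_mono lst (by omega) hj
          have h2 := hi'next hj1
          rw [List.getD_eq_getElem s 0 hj1] at h2
          omega
      have hxs : x ∈ s := (PySem.List.mem_sorted lst (fun x => x) false x).mpr hxmem
      have hxm : x ≤ m := hmax x hxs hxle
      have hposm : pos < m := lt_of_lt_of_le hxgt hxm
      have hmle : m ≤ pos + K := hi'le
      have hmmem : m ∈ lst := by
        rw [hmget] at *
        exact (PySem.List.mem_sorted lst (fun x => x) false _).mp (List.getElem_mem hi'len)
      -- A's scan returns exactly m
      have hscan : pvScanA lst (K + pos) pos = some m := by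
        apply pvScanA_eq_some lst pos m hposm (List.contains_iff_mem.mpr hmmem)
          (K + pos - m).toNat (K + pos) rfl (by omega)
        intro t ht1 ht2 hct
        have : t ≤ m := hmax t
          ((PySem.List.mem_sorted lst (fun x => x) false t).mpr (List.contains_iff_mem.mp hct))
          (by omega)
        omega
      rw [hscan]
      exact ih m (count + 1) i' (by omega) (Or.inr hmmem) hi'len (by omega)
    · rw [if_neg hc, if_neg hc]

-- A's first loop from index i on: returns none iff no condition fires on [i, M-1)
theorem pvCheckA_none_iff (K N M : Int) (lst : List Int) : ∀ (n : Nat) (i : Int), (M - 1 - i).toNat = n →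
    (pvCheckA K N M lst i = none ↔
      ((∀ j : Int, i ≤ j → j < M - 1 → PySem.List.pyGetD lst (j + 1) 0 - PySem.List.pyGetD lst j 0 ≤ K) ∧
       (M - 1 ≤ i ∨ (N - PySem.List.pyGetD lst (-1) 0 ≤ K ∧ PySem.List.pyGetD lst 0 0 ≤ K)))) := by
  intro n
  induction n with
  | zero =>
    intro i hn
    rw [pvCheckA, dif_neg (by omega)]
    simp only [true_iff]
    exact ⟨fun j hj hj' => by omega, Or.inl (by omega)⟩
  | succ k ih =>
    intro i hn
    rw [pvCheckA, dif_pos (by omega)]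
    by_cases hg : PySem.List.pyGetD lst (i + 1) 0 - PySem.List.pyGetD lst i 0 > K
    · rw [if_pos hg]
      simp only [reduceCtorEq, false_iff]
      rintro ⟨hall, -⟩
      exact absurd (hall i le_rfl (by omega)) (by omega)
    · rw [if_neg hg]
      by_cases h2 : N - PySem.List.pyGetD lst (-1) 0 > K
      · rw [if_pos h2]
        simp only [reduceCtorEq, false_iff]
        rintro ⟨-, h | ⟨hh, -⟩⟩
        · omega
        · omega
      · rw [if_neg h2]
        by_cases h3 : PySem.List.pyGetD lst 0 0 > K
        · rw [if_pos h3]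
          simp only [reduceCtorEq, false_iff]
          rintro ⟨-, h | ⟨-, hh⟩⟩
          · omega
          · omega
        · rw [if_neg h3]
          rw [ih (i + 1) (by omega)]
          constructor
          · rintro ⟨hall, -⟩
            refine ⟨?_, Or.inr ⟨by omega, by omega⟩⟩
            intro j hj hj'
            rcases eq_or_lt_of_le hj with rfl | hj''
            · omega
            · exact hall j (by omega) hj'
          · rintro ⟨hall, -⟩
            exact ⟨fun j hj hj' => hall j (by omega) hj',
              Or.inr ⟨by omega, by omega⟩⟩

theorem pvCheckA_none_or_zero (K N M : Int) (lst : List Int) : ∀ (n : Nat) (i : Int), (M - 1 - i).toNat = n →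
    pvCheckA K N M lst i = none ∨ pvCheckA K N M lst i = some 0 := by
  intro n
  induction n with
  | zero =>
    intro i hn
    rw [pvCheckA, dif_neg (by omega)]
    exact Or.inl rfl
  | succ k ih =>
    intro i hn
    rw [pvCheckA, dif_pos (by omega)]
    split_ifs with h1 h2 h3
    · exact Or.inr rfl
    · exact Or.inr rfl
    · exact Or.inr rfl
    · exact ih (i + 1) (by omega)

theorem pvZipTake : ∀ (a b : List Int) (k : Nat), a.zip (b.take k) = (a.zip b).take k := by
  intro a
  induction a with
  | nil => intro b k; simp
  | cons x a ih =>
    intro b k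
    cases b with
    | nil => simp
    | cons y b =>
      cases k with
      | zero => simp
      | succ k => simp [List.zip_cons_cons, ih]

-- B's zip with lst[1:M] is the first min(M-1, len-1) consecutive pairs
theorem pvSliceZip (M : Int) (lst : List Int) (hM : 2 ≤ M) :
    lst.zip (PySem.List.slice lst (some 1) (some M)) = (lst.zip lst.tail).take (M - 1).toNat := by
  rw [PySem.List.slice_toNat lst (by omega) (by omega)]
  rw [show Int.toNat 1 = 1 from rfl, List.drop_one,
    show M.toNat - 1 = (M - 1).toNat from by omega, pvZipTake]

-- the pair at prefix index j of zip lst lst.tail is (lst[j], lst[j+1])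
theorem pvTakePair (K M : Int) (lst : List Int) (j : Int) (hj0 : 0 ≤ j) (hjM : j < M - 1)
    (hjlen : j + 1 < (lst.length : Int))
    (hall : (((lst.zip lst.tail).take (M - 1).toNat).all (fun p => decide (p.2 - p.1 ≤ K))) = true) :
    PySem.List.pyGetD lst (j + 1) 0 - PySem.List.pyGetD lst j 0 ≤ K := by
  have hj2 : j.toNat < ((lst.zip lst.tail).take (M - 1).toNat).length := by
    simp only [List.length_take, List.length_zip, List.length_tail]
    omega
  have hmem := List.all_eq_true.mp hall _ (List.getElem_mem hj2)
  rw [List.getElem_take, List.getElem_zip] at hmem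
  simp only [List.getElem_tail, decide_eq_true_eq] at hmem
  rw [PySem.List.pyGetD_eq_getElem lst 0 (by omega) (by omega),
    PySem.List.pyGetD_eq_getElem lst 0 (by omega) (by omega)]
  simp only [show (j + 1).toNat = j.toNat + 1 from by omega] at *
  omega

-- if a feasibility condition fires (first branch of Pre_), A returns 0
theorem pvFireA (K N M : Int) (lst : List Int) (hM : 2 ≤ M) (hn : 2 ≤ lst.length)
    (hfire : (((lst.zip lst.tail).take (M - 1).toNat).any (fun p => decide (p.2 - p.1 > K))) = true ∨
      lst.getD 0 0 > K ∨ N - lst.getLast?.getD 0 > K) :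
    min_charge_num K N M lst = 0 := by
  have hne : lst ≠ [] := by intro h; rw [h] at hn; simp at hn
  have hcheck : pvCheckA K N M lst 0 ≠ none := by
    intro hnone
    rw [pvCheckA_none_iff K N M lst (M - 1 - 0).toNat 0 rfl] at hnone
    obtain ⟨hall, hor⟩ := hnone
    have hor' : N - PySem.List.pyGetD lst (-1) 0 ≤ K ∧ PySem.List.pyGetD lst 0 0 ≤ K := by
      rcases hor with h | h
      · omega
      · exact h
    rcases hfire with hgap | hhead | hlast
    · rw [List.any_eq_true] at hgap
      obtain ⟨p, hp, hpK⟩ := hgap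
      obtain ⟨i, hi, rfl⟩ := List.mem_iff_getElem.mp hp
      have hilen : i < (lst.zip lst.tail).length := lt_of_lt_of_le hi (by simp [List.length_take])
      have hiM : i < (M - 1).toNat := lt_of_lt_of_le hi (by simp [List.length_take])
      have hizip : i + 1 < lst.length := by
        have := hilen
        simp [List.length_zip, List.length_tail] at this
        omega
      rw [List.getElem_take, List.getElem_zip] at hpK
      have hgapv := hall (i : Int) (by omega) (by omega)
      rw [PySem.List.pyGetD_eq_getElem lst 0 (by omega) (by omega),
        PySem.List.pyGetD_eq_getElem lst 0 (by omega) (by omega)] at hgapv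
      simp only [show ((i : Int) + 1).toNat = i + 1 from by omega,
        show ((i : Int)).toNat = i from by omega] at hgapv
      simp only [decide_eq_true_eq, List.getElem_tail] at hpK
      omega
    · rw [PySem.List.pyGetD_zero lst 0] at hor'
      omega
    · rw [PySem.List.pyGetD_neg_one lst 0 hne] at hor'
      rw [List.getLast?_eq_some_getLast hne] at hlast
      simp only [Option.getD_some] at hlast
      omega
  unfold min_charge_num
  rcases pvCheckA_none_or_zero K N M lst (M - 1 - 0).toNat 0 rfl with h | h
  · exact absurd h hcheck
  · rw [h]

-- if a feasibility condition fires (first branch of Pre_), B returns 0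
theorem pvFireB (K N M : Int) (lst : List Int) (hM : 2 ≤ M) (hn : 2 ≤ lst.length)
    (hfire : (((lst.zip lst.tail).take (M - 1).toNat).any (fun p => decide (p.2 - p.1 > K))) = true ∨
      lst.getD 0 0 > K ∨ N - lst.getLast?.getD 0 > K) :
    min_charge_num_alt K N M lst = 0 := by
  have hne : lst ≠ [] := by intro h; rw [h] at hn; simp at hn
  unfold min_charge_num_alt
  rw [if_pos hM, pvSliceZip M lst hM]
  by_cases hany : (((lst.zip lst.tail).take (M - 1).toNat).any (fun p => decide (p.2 - p.1 > K))) = true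
  · rw [if_pos hany]
  · rw [if_neg hany]
    rw [if_pos ?_]
    rcases hfire with h | h | h
    · exact absurd h hany
    · left
      rw [PySem.List.pyGetD_zero lst 0]
      exact h
    · right
      rw [PySem.List.pyGetD_neg_one lst 0 hne, List.getLast?_eq_some_getLast hne] at *
      simpa using h

-- ===== VERDICT (by name: the statement is the Claim_ definition above) =====
theorem min_charge_num_spec : Claim_equal_min_charge_num := by
  intro K N M lst _ hpre
  unfold Spec_min_charge_num
  rcases hpre with ⟨hM, hn, hfire⟩ | ⟨hcp, hw⟩
  · rw [pvFireA K N M lst hM hn hfire, pvFireB K N M lst hM hn hfire]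
  · -- A's check passes
    have hnone : pvCheckA K N M lst 0 = none := by
      rw [pvCheckA_none_iff K N M lst (M - 1 - 0).toNat 0 rfl]
      rcases hcp with hM1 | ⟨hM2, hMlen, hall, hhead, hlast⟩
      · exact ⟨fun j hj hj' => absurd hj' (by omega), Or.inl (by omega)⟩
      · have hne : lst ≠ [] := by
          intro h; rw [h] at hMlen; simp at hMlen; omega
        refine ⟨?_, Or.inr ?_⟩
        · intro j hj hj'
          exact pvTakePair K M lst j hj hj' (by omega) hall
        · rw [PySem.List.pyGetD_zero lst 0, PySem.List.pyGetD_neg_one lst 0 hne]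
          rw [List.getLast?_eq_some_getLast hne] at hlast
          simp only [Option.getD_some] at hlast
          exact ⟨hlast, hhead⟩
    have hA : min_charge_num K N M lst = pvLoopA K N lst 0 0 ((N - K).toNat + 1) := by
      unfold min_charge_num
      rw [hnone]
    have hB : min_charge_num_alt K N M lst =
        pvLoopB K N (PySem.List.sorted lst (fun x => x) false) 0 0 0 ((N - K).toNat + 1) := by
      unfold min_charge_num_alt
      by_cases hM2 : 2 ≤ M
      · rw [if_pos hM2]
        rcases hcp with hM1 | ⟨-, hMlen, hall, hhead, hlast⟩
        · omega
        · have hne : lst ≠ [] := by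
            intro h; rw [h] at hMlen; simp at hMlen; omega
          have hany : (lst.zip (PySem.List.slice lst (some 1) (some M))).any
              (fun p => decide (p.2 - p.1 > K)) = false := by
            rw [pvSliceZip M lst hM2, List.any_eq_false]
            intro p hp
            have := List.all_eq_true.mp hall p hp
            simp only [decide_eq_true_eq] at *
            omega
          rw [hany]
          simp only [Bool.false_eq_true, if_false]
          rw [if_neg ?_]
          rw [PySem.List.pyGetD_zero lst 0, PySem.List.pyGetD_neg_one lst 0 hne]
          rw [List.getLast?_eq_some_getLast hne] at hlast
          simp only [Option.getD_some] at hlast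
          rintro (h1 | h2)
          · omega
          · omega
      · rw [if_neg hM2]
    rw [hA, hB]
    by_cases hNK : N - K ≤ 0
    · rw [pvLoopA, pvLoopB, if_neg (by omega), if_neg (by omega)]
    · have HW : ∀ p, (p = 0 ∨ p ∈ lst) → 0 ≤ p → p < N - K → ∃ x ∈ lst, p < x ∧ x ≤ p + K := by
        rcases hw with h | h
        · omega
        · intro p hp h0 hNKp
          refine h p ?_ h0 hNKp
          rcases hp with rfl | hp
          · exact List.mem_cons_self
          · exact List.mem_cons_of_mem _ hp
      obtain ⟨x0, hx0mem, hx0gt, hx0le⟩ := HW 0 (Or.inl rfl) le_rfl (by omega)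
      have hne : lst ≠ [] := by
        intro h; rw [h] at hx0mem; simp at hx0mem
      set s := PySem.List.sorted lst (fun x => x) false with hs
      have hslen : 0 < s.length := by
        rw [hs, PySem.List.length_sorted]
        exact List.length_pos_of_ne_nil hne
      have hs0 : s.getD 0 0 ≤ 0 + K := by
        obtain ⟨m, t, hmt⟩ : ∃ m t, s = m :: t := by
          cases hsc : s with
          | nil => rw [hsc] at hslen; simp at hslen
          | cons m t => exact ⟨m, t, rfl⟩
        have hmin : ∀ y ∈ lst, m ≤ y := by
          have := PySem.List.key_head_sorted_le lst (fun x => x) hmt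
          simpa using this
        have := hmin x0 hx0mem
        rw [hmt]
        simp only [List.getD_cons_zero]
        omega
      exact pvLoop_eq K N lst HW ((N - K).toNat + 1) 0 0 0 le_rfl (Or.inl rfl) hslen hs0
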